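-- pv_equiv track=rewrite | github.com/lilyth85/BTVN_Python | hackathon1_midterm/easy.py | alpha_num
-- ===== SOURCE A (Python) =====
-- def alpha_num(sentence):
--     list_words = []
--     words = sentence.strip().split()
--     for i in words:
--         is_text = False
--         is_number = False
--         for j in i:
--             if j.isalpha():
--                 is_text = True
--             elif j.isnumeric():
--                 is_number= True
--             if is_text and is_number:
--                 list_words.append(i)
--                 break
--     return list_words
-- ===== SOURCE B (Python) =====
-- def alpha_num(sentence):
--     # single character-level pass: tokenize and classify at once, no strip()/split()
--     out = []
--     word = ''
--     has_a = has_d = False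
--     for c in sentence + ' ':
--         if c.isspace():
--             if has_a and has_d:
--                 out.append(word)
--             word = ''
--             has_a = has_d = False
--         else:
--             word += c
--             has_a = has_a or c.isalpha()
--             has_d = has_d or c.isnumeric()
--     return out
-- ===== Notes on version B (the rewrite author's own statement) =====
-- stated objective: alternative
-- what changed: Replaces A's strip().split() followed by a per-word flagged scan with a single character-level pass over the raw string that tokenizes and classifies simultaneously, flushing a word at each whitespace boundary.
import Mathlib
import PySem

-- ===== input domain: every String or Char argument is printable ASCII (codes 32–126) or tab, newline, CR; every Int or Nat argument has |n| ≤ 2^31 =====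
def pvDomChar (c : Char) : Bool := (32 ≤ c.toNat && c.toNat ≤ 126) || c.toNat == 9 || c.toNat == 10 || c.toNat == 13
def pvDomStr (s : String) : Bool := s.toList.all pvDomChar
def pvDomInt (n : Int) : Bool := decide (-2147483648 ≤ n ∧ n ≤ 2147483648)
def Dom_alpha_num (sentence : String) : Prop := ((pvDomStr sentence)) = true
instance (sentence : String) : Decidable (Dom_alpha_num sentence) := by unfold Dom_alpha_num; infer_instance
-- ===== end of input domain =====

-- B replaces A's strip/split + per-word flagged scan by one character-level pass that
-- tokenizes and classifies at once; same values, same cost (objective: alternative).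

-- ===== PORT A =====
-- inner 'for j in i' loop of A: flags is_text / is_number, append+break once both hold;
-- returns true iff the word gets appended
def alphaNumInner : List Char → Bool → Bool → Bool
  | [], _, _ => false
  | j :: rest, is_text, is_number =>
    let is_text' := if PySem.Chars.isalpha j then true else is_text
    let is_number' := if !PySem.Chars.isalpha j && PySem.Chars.isdigit j then true else is_number
    if is_text' && is_number' then true else alphaNumInner rest is_text' is_number'

def alpha_num (sentence : String) : List String :=
  (PySem.Str.split₀ (PySem.Str.strip sentence)).foldl
    (fun list_words i =>
      if alphaNumInner i.toList false false then list_words ++ [i] else list_words) []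

-- ===== PORT B =====
-- the for-loop of Source B: state (out, word, has_a, has_d), one step per character
def alphaNumAltGo : List Char → List String → List Char → Bool → Bool → List String
  | [], out, _, _, _ => out
  | c :: rest, out, word, has_a, has_d =>
    if PySem.Chars.isspace c then
      alphaNumAltGo rest (if has_a && has_d then out ++ [String.ofList word] else out) [] false false
    else
      alphaNumAltGo rest out (word ++ [c])
        (has_a || PySem.Chars.isalpha c) (has_d || PySem.Chars.isdigit c)

def alpha_num_alt (sentence : String) : List String :=
  alphaNumAltGo (sentence.toList ++ [' ']) [] [] false false

-- ===== PRECONDITION & SPEC =====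
def Spec_alpha_num (sentence : String) (out : List String) : Prop := out = alpha_num_alt sentence
instance (sentence : String) (out : List String) : Decidable (Spec_alpha_num sentence out) := by unfold Spec_alpha_num; infer_instance

-- ===== CLAIM (what is proved, stated in full; the proofs are below) =====
def Claim_equal_alpha_num : Prop := ∀ (sentence : String), Dom_alpha_num sentence → Spec_alpha_num sentence (alpha_num sentence)

-- ===== LEMMAS AND PROOFS =====

-- the keep-predicate both programs implement
def pvKeep (w : List Char) : Bool := w.any PySem.Chars.isalpha && w.any PySem.Chars.isdigit

-- unfolding equations for split₀.go and alphaNumAltGo (definitional)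
theorem go_nil (cur : List Char) (acc : List (List Char)) :
    PySem.Chars.split₀.go [] cur acc =
      if cur.isEmpty then acc.reverse else (cur.reverse :: acc).reverse := rfl

theorem go_cons (c : Char) (cs cur : List Char) (acc : List (List Char)) :
    PySem.Chars.split₀.go (c :: cs) cur acc =
      if PySem.Chars.isspace c then
        (if cur.isEmpty then PySem.Chars.split₀.go cs [] acc
         else PySem.Chars.split₀.go cs [] (cur.reverse :: acc))
      else PySem.Chars.split₀.go cs (c :: cur) acc := rfl

-- ASCII letters and digits are disjoint ranges, so A's 'elif' never hides a digit
theorem alpha_digit_disjoint (c : Char) : (PySem.Chars.isalpha c && PySem.Chars.isdigit c) = false := by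
  simp only [PySem.Chars.isalpha, PySem.Chars.isdigit, PySem.Chars.isupper, PySem.Chars.islower,
    Char.le_def, UInt32.le_iff_toNat_le]
  by_cases h1 : ('A'.val.toNat ≤ c.val.toNat) <;> by_cases h2 : (c.val.toNat ≤ 'Z'.val.toNat) <;>
  by_cases h3 : ('a'.val.toNat ≤ c.val.toNat) <;> by_cases h4 : (c.val.toNat ≤ 'z'.val.toNat) <;>
  by_cases h5 : ('0'.val.toNat ≤ c.val.toNat) <;> by_cases h6 : (c.val.toNat ≤ '9'.val.toNat) <;>
    simp_all <;> omega

theorem alphaNumInner_eq (cs : List Char) : ∀ t n, (t && n) = false →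
    alphaNumInner cs t n =
      ((t || cs.any PySem.Chars.isalpha) && (n || cs.any PySem.Chars.isdigit)) := by
  induction cs with
  | nil => intro t n h; cases t <;> simp_all [alphaNumInner]
  | cons c cs ih =>
    intro t n h
    have hd := alpha_digit_disjoint c
    cases ha : PySem.Chars.isalpha c <;> cases hg : PySem.Chars.isdigit c <;>
      cases t <;> cases n <;> simp_all [alphaNumInner]

-- split₀.go with a nonempty accumulator: the accumulated words come first
theorem go_acc (cs : List Char) : ∀ cur acc,
    PySem.Chars.split₀.go cs cur acc = acc.reverse ++ PySem.Chars.split₀.go cs cur [] := by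
  induction cs with
  | nil =>
    intro cur acc
    by_cases h : cur.isEmpty <;> simp [go_nil, h]
  | cons c cs ih =>
    intro cur acc
    rw [go_cons, go_cons]
    by_cases hs : PySem.Chars.isspace c
    · by_cases h : cur.isEmpty <;>
        simp only [hs, h, if_true, if_false, ite_true, ite_false] <;>
        rw [ih [] acc] <;> try rw [ih [] (cur.reverse :: acc), ih [] [cur.reverse]]
      · simp
    · simp only [hs, ite_false, Bool.false_eq_true, if_neg]
      rw [ih (c :: cur) acc]

-- a run of pure whitespace acts like the empty string on split₀.go
theorem go_ws (ws : List Char) : ∀ cur acc, ws.all PySem.Chars.isspace →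
    PySem.Chars.split₀.go ws cur acc = PySem.Chars.split₀.go [] cur acc := by
  induction ws with
  | nil => intro cur acc _; rfl
  | cons w ws ih =>
    intro cur acc hall
    simp only [List.all_cons, Bool.and_eq_true] at hall
    rw [go_cons, if_pos hall.1]
    by_cases h : cur.isEmpty
    · rw [if_pos h, ih [] acc hall.2]; simp [go_nil, h]
    · rw [if_neg h, ih [] (cur.reverse :: acc) hall.2]; simp [go_nil, h]

-- trailing whitespace does not change split₀.go
theorem go_append_ws (cs : List Char) : ∀ ws cur acc, ws.all PySem.Chars.isspace →
    PySem.Chars.split₀.go (cs ++ ws) cur acc = PySem.Chars.split₀.go cs cur acc := by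
  induction cs with
  | nil => intro ws cur acc hall; exact go_ws ws cur acc hall
  | cons c cs ih =>
    intro ws cur acc hall
    rw [List.cons_append, go_cons, go_cons]
    by_cases hs : PySem.Chars.isspace c
    · by_cases h : cur.isEmpty
      · rw [if_pos hs, if_pos hs, if_pos h, if_pos h, ih _ _ _ hall]
      · rw [if_pos hs, if_pos hs, if_neg h, if_neg h, ih _ _ _ hall]
    · rw [if_neg hs, if_neg hs, ih _ _ _ hall]

-- leading whitespace does not change split₀.go (empty current word)
theorem go_ws_prefix (ws : List Char) : ∀ cs acc, ws.all PySem.Chars.isspace →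
    PySem.Chars.split₀.go (ws ++ cs) [] acc = PySem.Chars.split₀.go cs [] acc := by
  induction ws with
  | nil => intro cs acc _; rfl
  | cons w ws ih =>
    intro cs acc hall
    simp only [List.all_cons, Bool.and_eq_true] at hall
    rw [List.cons_append, go_cons, if_pos hall.1,
        if_pos (show ([] : List Char).isEmpty = true from rfl), ih _ _ hall.2]

theorem split₀_strip (cs : List Char) :
    PySem.Chars.split₀ (PySem.Chars.strip cs) = PySem.Chars.split₀ cs := by
  unfold PySem.Chars.split₀ PySem.Chars.strip PySem.Chars.rstrip PySem.Chars.lstrip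
  have h1 : cs = List.takeWhile PySem.Chars.isspace cs ++ List.dropWhile PySem.Chars.isspace cs :=
    (List.takeWhile_append_dropWhile).symm
  set d := List.dropWhile PySem.Chars.isspace cs with hd
  have h2 : d = (List.dropWhile PySem.Chars.isspace d.reverse).reverse ++
      (List.takeWhile PySem.Chars.isspace d.reverse).reverse := by
    have h3 := (List.takeWhile_append_dropWhile (p := PySem.Chars.isspace) (l := d.reverse))
    calc d = d.reverse.reverse := by simp
    _ = (List.takeWhile PySem.Chars.isspace d.reverse ++
          List.dropWhile PySem.Chars.isspace d.reverse).reverse := by rw [h3]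
    _ = _ := by rw [List.reverse_append]
  conv_rhs => rw [h1, h2]
  rw [go_ws_prefix _ _ _ (List.all_takeWhile),
      go_append_ws _ _ _ _ (by simpa using List.all_takeWhile (p := PySem.Chars.isspace) (l := d.reverse))]

-- B's character loop computes the filtered words of split₀, given the flag invariant
theorem altGo_eq (cs : List Char) : ∀ word out,
    alphaNumAltGo (cs ++ [' ']) out word (word.any PySem.Chars.isalpha) (word.any PySem.Chars.isdigit)
      = out ++ ((PySem.Chars.split₀.go cs word.reverse []).filter pvKeep).map String.ofList := by
  have hsp : PySem.Chars.isspace ' ' = true := by decide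
  induction cs with
  | nil =>
    intro word out
    show alphaNumAltGo [' '] out word _ _ = _
    rw [show alphaNumAltGo [' '] out word (word.any PySem.Chars.isalpha)
          (word.any PySem.Chars.isdigit) =
        (if word.any PySem.Chars.isalpha && word.any PySem.Chars.isdigit
         then out ++ [String.ofList word] else out) from by
      simp [alphaNumAltGo, hsp]]
    rw [go_nil]
    by_cases hk : pvKeep word
    · have hw : word ≠ [] := by rintro rfl; simp [pvKeep] at hk
      rw [if_pos (show (word.any PySem.Chars.isalpha && word.any PySem.Chars.isdigit) = true from hk),
          if_neg (show ¬(word.reverse.isEmpty = true) by simp [hw])]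
      simp [List.filter_cons, hk]
    · rw [if_neg (show ¬((word.any PySem.Chars.isalpha && word.any PySem.Chars.isdigit) = true) from hk)]
      by_cases hw : word = []
      · subst hw; simp
      · have hkf : pvKeep word = false := by simpa using hk
        rw [if_neg (show ¬(word.reverse.isEmpty = true) by simp [hw])]
        simp [List.filter_cons, hkf]
  | cons c cs ih =>
    intro word out
    rw [List.cons_append, go_cons]
    by_cases hs : PySem.Chars.isspace c
    · rw [show alphaNumAltGo (c :: (cs ++ [' '])) out word (word.any PySem.Chars.isalpha)
            (word.any PySem.Chars.isdigit) =
          alphaNumAltGo (cs ++ [' '])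
            (if word.any PySem.Chars.isalpha && word.any PySem.Chars.isdigit
             then out ++ [String.ofList word] else out) [] false false from by
        simp [alphaNumAltGo, hs]]
      have step := ih [] (if word.any PySem.Chars.isalpha && word.any PySem.Chars.isdigit
          then out ++ [String.ofList word] else out)
      simp only [List.any_nil, List.reverse_nil] at step
      rw [step, if_pos hs]
      by_cases hk : pvKeep word
      · have hw : word ≠ [] := by rintro rfl; simp [pvKeep] at hk
        rw [if_pos (show (word.any PySem.Chars.isalpha && word.any PySem.Chars.isdigit) = true from hk),
            if_neg (show ¬(word.reverse.isEmpty = true) by simp [hw])]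
        simp only [List.reverse_reverse]
        rw [go_acc cs [] [word]]
        simp [List.filter_cons, hk]
      · rw [if_neg (show ¬((word.any PySem.Chars.isalpha && word.any PySem.Chars.isdigit) = true) from hk)]
        by_cases hw : word = []
        · subst hw; simp
        · have hkf : pvKeep word = false := by simpa using hk
          rw [if_neg (show ¬(word.reverse.isEmpty = true) by simp [hw])]
          simp only [List.reverse_reverse]
          rw [go_acc cs [] [word]]
          simp [List.filter_cons, hkf]
    · rw [show alphaNumAltGo (c :: (cs ++ [' '])) out word (word.any PySem.Chars.isalpha)
            (word.any PySem.Chars.isdigit) =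
          alphaNumAltGo (cs ++ [' ']) out (word ++ [c])
            (word.any PySem.Chars.isalpha || PySem.Chars.isalpha c)
            (word.any PySem.Chars.isdigit || PySem.Chars.isdigit c) from by
        simp [alphaNumAltGo, hs]]
      have step := ih (word ++ [c]) out
      simp only [List.any_append, List.any_cons, List.any_nil, Bool.or_false,
        List.reverse_append, List.reverse_cons, List.reverse_nil, List.nil_append] at step
      rw [step, if_neg (by simpa using hs)]
      simp

-- ===== VERDICT (by name: the statement is the Claim_ definition above) =====
theorem alpha_num_spec : Claim_equal_alpha_num := by
  intro sentence _
  unfold Spec_alpha_num alpha_num alpha_num_alt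
  rw [PySem.List.foldl_append_if_eq_filter]
  simp only [List.nil_append]
  have hB := altGo_eq sentence.toList [] []
  simp only [List.any_nil, List.reverse_nil, List.nil_append] at hB
  rw [hB]
  have hA : PySem.Str.split₀ (PySem.Str.strip sentence)
      = (PySem.Chars.split₀ sentence.toList).map String.ofList := by
    simp [PySem.Str.split₀, PySem.Str.strip, split₀_strip]
  rw [hA, List.filter_map]
  have hf : List.filter ((fun i => alphaNumInner i.toList false false) ∘ String.ofList)
        (PySem.Chars.split₀ sentence.toList)
      = List.filter pvKeep (PySem.Chars.split₀ sentence.toList) := by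
    apply List.filter_congr
    intro w _
    simp [Function.comp, alphaNumInner_eq w false false rfl, pvKeep]
  rw [hf]
  rfl
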